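-- pv_equiv track=rewrite | github.com/matthewnapoli/imc-prosperity-4-backtester | src/models/price_row.py | __get_column_values
-- ===== SOURCE A (Python) =====
-- def __get_column_values(columns: list[str], indices: list[int]) -> list[int]:
--     values = []
--     for index in indices:
--         value = columns[index]
--         if value == "":
--             break
--         values.append(int(value))
--     return values
-- ===== SOURCE B (Python) =====
-- def __get_column_values(columns, indices):
--     # Recursive decomposition: no accumulator and no break — the result is
--     # built front-to-back by consing onto the recursive call; recursion stops
--     # at an empty index list or an empty column value.
--     if not indices:
--         return []
--     value = columns[indices[0]]
--     if value == "":
--         return []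
--     return [int(value)] + __get_column_values(columns, indices[1:])
-- ===== Notes on version B (the rewrite author's own statement) =====
-- stated objective: alternative
-- what changed: Replaced A's iterative loop with a mutable accumulator and break by a structural recursion on the index list that conses each converted value onto the recursive result, with the stop condition as a base case.
import Mathlib
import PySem

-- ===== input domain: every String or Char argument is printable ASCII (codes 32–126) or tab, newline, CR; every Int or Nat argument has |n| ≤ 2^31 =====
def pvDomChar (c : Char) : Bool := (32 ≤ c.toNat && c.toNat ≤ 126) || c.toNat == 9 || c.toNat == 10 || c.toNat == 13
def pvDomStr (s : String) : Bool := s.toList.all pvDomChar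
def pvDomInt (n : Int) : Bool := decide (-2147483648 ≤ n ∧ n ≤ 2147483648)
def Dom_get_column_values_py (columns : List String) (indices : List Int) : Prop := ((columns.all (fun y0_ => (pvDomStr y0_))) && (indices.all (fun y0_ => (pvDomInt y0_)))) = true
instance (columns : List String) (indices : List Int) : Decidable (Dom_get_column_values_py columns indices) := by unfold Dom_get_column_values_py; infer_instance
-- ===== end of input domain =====

-- B replaces A's iterative loop (mutable accumulator + break) by a structural
-- recursion on the index list that conses each converted value onto the
-- recursive result; equivalence of the return values is proved on all inputs
-- where A returns normally (Pre_).

-- ===== PORT A =====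
-- loop with accumulator `values`; the `none` branches correspond to Python
-- raising (IndexError / ValueError), excluded by Pre_
def pvLoopA (columns : List String) : List Int → List Int → List Int
  | values, [] => values
  | values, i :: rest =>
    match PySem.List.pyGet? columns i with
    | none => values
    | some v =>
      if v = "" then values
      else
        match PySem.Int.ofStr? v with
        | none => values
        | some n => pvLoopA columns (values ++ [n]) rest

def get_column_values_py (columns : List String) (indices : List Int) : List Int :=
  pvLoopA columns [] indices

-- ===== PORT B =====
-- structural recursion, consing onto the recursive call; `getD` defaults stand
-- for Python raising (IndexError / ValueError), excluded by Pre_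
def pvRecB (columns : List String) : List Int → List Int
  | [] => []
  | i :: rest =>
    let value := (PySem.List.pyGet? columns i).getD ""
    if value = "" then []
    else [(PySem.Int.ofStr? value).getD 0] ++ pvRecB columns rest

def get_column_values_py_alt (columns : List String) (indices : List Int) : List Int :=
  pvRecB columns indices

-- ===== PRECONDITION & SPEC =====
-- A returns normally iff every index strictly before the first position whose
-- column is the empty string is in range and its column parses as a Python int
def Pre_get_column_values_py (columns : List String) (indices : List Int) : Prop :=
  ∀ i ∈ indices.take (indices.findIdx (fun j => PySem.List.pyGet? columns j == some "")),
    PySem.Raise.InRange columns.length i ∧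
      (PySem.Int.ofStr? ((PySem.List.pyGet? columns i).getD "")).isSome = true
instance (columns : List String) (indices : List Int) : Decidable (Pre_get_column_values_py columns indices) := by
  unfold Pre_get_column_values_py; infer_instance

def pvWitness_get_column_values_py : List String × List Int := (["1", "", "23"], [0, 2, 1, 9])

def Spec_get_column_values_py (columns : List String) (indices : List Int) (out : List Int) : Prop := out = get_column_values_py_alt columns indices
instance (columns : List String) (indices : List Int) (out : List Int) : Decidable (Spec_get_column_values_py columns indices out) := by unfold Spec_get_column_values_py; infer_instance

-- ===== CLAIM (what is proved, stated in full; the proofs are below) =====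
def Claim_equal_get_column_values_py : Prop := ∀ (columns : List String) (indices : List Int), Dom_get_column_values_py columns indices → Pre_get_column_values_py columns indices → Spec_get_column_values_py columns indices (get_column_values_py columns indices)

-- ===== LEMMAS AND PROOFS =====

-- proof-side helper: A's loop runs to completion (no raising branch taken)
def pvPreB (columns : List String) : List Int → Bool
  | [] => true
  | i :: rest =>
    match PySem.List.pyGet? columns i with
    | none => false
    | some v => if v = "" then true else (PySem.Int.ofStr? v).isSome && pvPreB columns rest

theorem pre_imp_pvPreB (columns : List String) (indices : List Int)
    (h : Pre_get_column_values_py columns indices) : pvPreB columns indices = true := by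
  induction indices with
  | nil => rfl
  | cons i rest ih =>
    unfold Pre_get_column_values_py at h
    by_cases he : PySem.List.pyGet? columns i = some ""
    · simp [pvPreB, he]
    · have hfi : (PySem.List.pyGet? columns i == some "") = false := by simp [he]
      simp only [List.findIdx_cons, hfi, cond_false, List.take_succ_cons,
        List.mem_cons, forall_eq_or_imp] at h
      obtain ⟨hhead, h⟩ := h
      obtain ⟨hin, hparse⟩ := hhead
      cases hg : PySem.List.pyGet? columns i with
      | none =>
        rw [PySem.List.pyGet?_eq_none_iff] at hg; exact absurd hin hg
      | some v =>
        have hv : v ≠ "" := fun hv => he (hv ▸ hg)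
        rw [hg] at hparse
        simp only [pvPreB, hg, if_neg hv, Bool.and_eq_true]
        refine ⟨by simpa using hparse, ih ?_⟩
        intro j hj
        exact h j hj

theorem pvLoopA_eq (columns : List String) (indices : List Int) :
    ∀ values : List Int, pvPreB columns indices = true →
      pvLoopA columns values indices = values ++ pvRecB columns indices := by
  induction indices with
  | nil => intro values _; simp [pvLoopA, pvRecB]
  | cons i rest ih =>
    intro values h
    simp only [pvPreB] at h
    cases hg : PySem.List.pyGet? columns i with
    | none => simp [hg] at h
    | some v =>
      rw [hg] at h
      by_cases hv : v = ""
      · subst hv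
        simp [pvLoopA, pvRecB, hg]
      · simp only [if_neg hv, Bool.and_eq_true, Option.isSome_iff_exists] at h
        obtain ⟨⟨n, hn⟩, hrest⟩ := h
        simp only [pvLoopA, pvRecB, hg, if_neg hv, hn]
        rw [ih _ hrest]
        simp [hn, hv]

-- ===== VERDICT (by name: the statement is the Claim_ definition above) =====
theorem get_column_values_py_spec : Claim_equal_get_column_values_py := by
  intro columns indices _ hpre
  unfold Spec_get_column_values_py get_column_values_py get_column_values_py_alt
  simpa using pvLoopA_eq columns indices [] (pre_imp_pvPreB columns indices hpre)
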